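-- pv_equiv track=rewrite | github.com/aadvertru/AI_monitor | libs/analysis/mention_extraction.py | _find_normalized_mentions
-- ===== SOURCE A (Python) =====
-- def _normalized_with_index_map(sentence: str) -> tuple[str, list[int]]:
--     normalized_chars: list[str] = []
--     index_map: list[int] = []
--     for index, char in enumerate(sentence):
--         if char.isalnum():
--             normalized_chars.append(char)
--             index_map.append(index)
--     return "".join(normalized_chars), index_map
--
-- def _find_normalized_mentions(sentence: str, normalized_brand: str) -> list[tuple[int, str]]:
--     if not normalized_brand:
--         return []
--
--     normalized_sentence, index_map = _normalized_with_index_map(sentence)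
--     if not normalized_sentence:
--         return []
--
--     matches: list[tuple[int, str]] = []
--     start = 0
--     while True:
--         normalized_index = normalized_sentence.find(normalized_brand, start)
--         if normalized_index < 0:
--             break
--
--         normalized_end = normalized_index + len(normalized_brand)
--         if normalized_end - 1 < len(index_map):
--             sentence_start = index_map[normalized_index]
--             sentence_end = index_map[normalized_end - 1] + 1
--             matches.append((sentence_start, sentence[sentence_start:sentence_end]))
--
--         start = normalized_index + 1
--
--     return matches
-- ===== SOURCE B (Python) =====
-- def _find_normalized_mentions(sentence: str, normalized_brand: str) -> list[tuple[int, str]]: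
--     if not normalized_brand:
--         return []
--     pairs = [(i, c) for i, c in enumerate(sentence) if c.isalnum()]
--     m = len(normalized_brand)
--     out = []
--     for i in range(len(pairs) - m + 1):
--         if [c for _, c in pairs[i:i + m]] == list(normalized_brand):
--             out.append((pairs[i][0], sentence[pairs[i][0]:pairs[i + m - 1][0] + 1]))
--     return out
-- ===== Notes on version B (the rewrite author's own statement) =====
-- stated objective: simpler
-- what changed: A normalizes into a string plus a separate index map and repeatedly restarts str.find from the previous hit + 1 in a while-True loop; B builds one filtered (index, char) list and collects all overlapping matches in a single plain scan over the window positions, with no find/restart bookkeeping.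
import Mathlib
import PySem

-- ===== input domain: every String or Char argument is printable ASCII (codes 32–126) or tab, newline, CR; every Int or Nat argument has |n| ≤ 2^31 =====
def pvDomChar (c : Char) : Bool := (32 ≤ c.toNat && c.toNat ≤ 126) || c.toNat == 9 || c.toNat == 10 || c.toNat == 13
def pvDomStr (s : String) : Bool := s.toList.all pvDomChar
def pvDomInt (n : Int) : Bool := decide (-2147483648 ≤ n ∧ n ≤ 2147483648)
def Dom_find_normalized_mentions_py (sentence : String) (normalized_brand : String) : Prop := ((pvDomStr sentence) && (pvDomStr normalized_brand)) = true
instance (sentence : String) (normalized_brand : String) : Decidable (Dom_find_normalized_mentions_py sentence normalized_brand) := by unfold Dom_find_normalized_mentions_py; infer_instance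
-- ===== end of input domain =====

-- B replaces A's repeated str.find-with-restart loop by a single filtered (index, char) list
-- scanned once over all window positions (objective: simpler; same results, no speed claim).

-- ===== PORT A =====
-- _normalized_with_index_map: one pass over enumerate(sentence) building the two accumulators
def pvNormWithMap (sentence : List Char) : List Char × List Int :=
  (PySem.List.enumerate sentence 0).foldl
    (fun acc p => if PySem.Chars.isalnum p.2 then (acc.1 ++ [p.2], acc.2 ++ [p.1]) else acc)
    ([], [])

-- the 'while True' find loop; the fuel argument only makes the recursion total
-- (norm.length + 1 suffices: 'start' strictly increases and never exceeds norm.length)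
def pvFindLoop (sentence norm : List Char) (indexMap : List Int) (brand : List Char)
    (fuel : Nat) (start : Nat) (ms : List (Int × String)) : List (Int × String) :=
  match fuel with
  | 0 => ms
  | fuel + 1 =>
    let ni := PySem.Chars.findFrom norm brand (start : Int)
    if ni < 0 then ms
    else
      let ne := ni + (brand.length : Int)
      let ms' :=
        if ne - 1 < (indexMap.length : Int) then
          let ss := PySem.List.pyGetD indexMap ni 0
          let se := PySem.List.pyGetD indexMap (ne - 1) 0 + 1
          ms ++ [(ss, String.ofList (PySem.List.slice sentence (some ss) (some se)))]
        else ms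
      pvFindLoop sentence norm indexMap brand fuel (ni.toNat + 1) ms'

def find_normalized_mentions_py (sentence : String) (normalized_brand : String) : List (Int × String) :=
  if normalized_brand.toList = [] then []
  else
    let nm := pvNormWithMap sentence.toList
    if nm.1 = [] then []
    else pvFindLoop sentence.toList nm.1 nm.2 normalized_brand.toList (nm.1.length + 1) 0 []

-- ===== PORT B =====
-- the 'for i in range(len(pairs) - m + 1)' scan of Source B
def pvScan (sent : List Char) (pairs : List (Int × Char)) (brand : List Char) : List (Int × String) :=
  (PySem.List.pyRange 0 ((pairs.length : Int) - (brand.length : Int) + 1) 1).foldl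
    (fun out i =>
      if (PySem.List.slice pairs (some i) (some (i + (brand.length : Int)))).map Prod.snd = brand then
        out ++ [((PySem.List.pyGetD pairs i (0, ' ')).1,
          String.ofList (PySem.List.slice sent
            (some (PySem.List.pyGetD pairs i (0, ' ')).1)
            (some ((PySem.List.pyGetD pairs (i + (brand.length : Int) - 1) (0, ' ')).1 + 1))))]
      else out) []

def find_normalized_mentions_py_alt (sentence : String) (normalized_brand : String) : List (Int × String) :=
  if normalized_brand.toList = [] then []
  else pvScan sentence.toList
    ((PySem.List.enumerate sentence.toList 0).filter (fun p => PySem.Chars.isalnum p.2))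
    normalized_brand.toList

-- ===== PRECONDITION & SPEC =====
def Spec_find_normalized_mentions_py (sentence : String) (normalized_brand : String) (out : List (Int × String)) : Prop := out = find_normalized_mentions_py_alt sentence normalized_brand
instance (sentence : String) (normalized_brand : String) (out : List (Int × String)) : Decidable (Spec_find_normalized_mentions_py sentence normalized_brand out) := by unfold Spec_find_normalized_mentions_py; infer_instance

-- ===== CLAIM (what is proved, stated in full; the proofs are below) =====
def Claim_equal_find_normalized_mentions_py : Prop := ∀ (sentence : String) (normalized_brand : String), Dom_find_normalized_mentions_py sentence normalized_brand → Spec_find_normalized_mentions_py sentence normalized_brand (find_normalized_mentions_py sentence normalized_brand)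

-- ===== LEMMAS AND PROOFS =====

-- proof-only abbreviations: the match test, the emitted element, the occurrence positions ≥ start
def pvP (norm brand : List Char) (i : Nat) : Bool := decide (brand <+: norm.drop i)

def pvF (sent : List Char) (imap : List Int) (m : Nat) (j : Nat) : Int × String :=
  let ss := PySem.List.pyGetD imap (j : Int) 0
  let se := PySem.List.pyGetD imap ((j : Int) + (m : Int) - 1) 0 + 1
  (ss, String.ofList (PySem.List.slice sent (some ss) (some se)))

def pvOcc (norm brand : List Char) (start : Nat) : List Nat :=
  (List.range norm.length).filter (fun i => decide (start ≤ i) && pvP norm brand i)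

lemma pvNorm_foldl (l : List (Int × Char)) (a : List Char) (b : List Int) :
    l.foldl (fun acc p => if PySem.Chars.isalnum p.2 then (acc.1 ++ [p.2], acc.2 ++ [p.1]) else acc) (a, b)
      = (a ++ (l.filter (fun p => PySem.Chars.isalnum p.2)).map Prod.snd,
         b ++ (l.filter (fun p => PySem.Chars.isalnum p.2)).map Prod.fst) := by
  induction l generalizing a b with
  | nil => simp
  | cons x t ih =>
    simp only [List.foldl_cons, List.filter_cons]
    by_cases h : PySem.Chars.isalnum x.2 = true
    · simp [h, ih]
    · simp [h, ih]

lemma pvNormWithMap_eq (s : List Char) :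
    pvNormWithMap s =
      (((PySem.List.enumerate s 0).filter (fun p => PySem.Chars.isalnum p.2)).map Prod.snd,
       ((PySem.List.enumerate s 0).filter (fun p => PySem.Chars.isalnum p.2)).map Prod.fst) := by
  simpa using pvNorm_foldl (PySem.List.enumerate s 0) [] []

lemma pvP_le (norm brand : List Char) (i : Nat) (hb : brand ≠ [])
    (h : (decide (brand <+: norm.drop i) : Bool) = true) :
    i + brand.length ≤ norm.length := by
  have h1 := List.IsPrefix.length_le (of_decide_eq_true h)
  have h2 : 1 ≤ brand.length := List.length_pos_iff.mpr hb
  simp [List.length_drop] at h1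
  omega

lemma pvOcc_nil (norm brand : List Char) (start : Nat)
    (h : ∀ i, start ≤ i → i < norm.length → pvP norm brand i = false) :
    pvOcc norm brand start = [] := by
  unfold pvOcc
  rw [List.filter_eq_nil_iff]
  intro i hi
  simp only [List.mem_range] at hi
  by_cases hs : start ≤ i
  · simp [hs, h i hs hi]
  · simp [hs]

lemma pvOcc_cons (norm brand : List Char) (start j : Nat)
    (hsj : start ≤ j) (hj : j < norm.length) (hPj : pvP norm brand j = true)
    (hmin : ∀ i, start ≤ i → i < j → pvP norm brand i = false) :
    pvOcc norm brand start = j :: pvOcc norm brand (j + 1) := by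
  unfold pvOcc
  have hsplit : List.range norm.length = List.range (j+1) ++ (List.range (norm.length - (j+1))).map (fun k => (j+1) + k) := by
    rw [← List.range_add]
    congr 1
    omega
  rw [hsplit, List.filter_append, List.filter_append]
  have h1 : (List.range (j+1)).filter (fun i => decide (start ≤ i) && pvP norm brand i) = [j] := by
    rw [List.range_succ, List.filter_append, List.filter_eq_nil_iff.mpr, List.nil_append]
    · simp [hsj, hPj]
    · intro i hi
      simp only [List.mem_range] at hi
      by_cases hs : start ≤ i
      · simp [hs, hmin i hs hi]
      · simp [hs]
  have h2 : (List.range (j+1)).filter (fun i => decide (j+1 ≤ i) && pvP norm brand i) = [] := by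
    rw [List.filter_eq_nil_iff]
    intro i hi
    simp only [List.mem_range] at hi
    simp [show ¬ (j+1 ≤ i) by omega]
  have h3 : ∀ (f : Nat → Bool), ((List.range (norm.length - (j+1))).map (fun k => (j+1) + k)).filter
      (fun i => decide (start ≤ i) && f i) = ((List.range (norm.length - (j+1))).map (fun k => (j+1) + k)).filter
      (fun i => decide (j+1 ≤ i) && f i) := by
    intro f
    apply List.filter_congr
    intro i hi
    simp only [List.mem_map, List.mem_range] at hi
    obtain ⟨k, hk, rfl⟩ := hi
    simp [show start ≤ j+1+k by omega, show j+1 ≤ j+1+k by omega]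
  rw [h1, h2, h3]
  simp

lemma pvFindLoop_eq (sent norm : List Char) (imap : List Int) (brand : List Char)
    (hlen : imap.length = norm.length) (hb : brand ≠ []) :
    ∀ (fuel start : Nat) (acc : List (Int × String)), start ≤ norm.length →
      norm.length + 1 - start ≤ fuel →
      pvFindLoop sent norm imap brand fuel start acc
        = acc ++ (pvOcc norm brand start).map (pvF sent imap brand.length) := by
  intro fuel
  induction fuel with
  | zero => intro start acc hs hf; omega
  | succ fuel ih =>
    intro start acc hs hf
    have hrep := PySem.Chars.findFrom_natCast norm brand start hs
    by_cases hfind : PySem.Chars.find (norm.drop start) brand = -1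
    · -- not found: ni = -1, loop stops, no occurrence at or after start
      have hni : PySem.Chars.findFrom norm brand (start : Int) = -1 := by rw [hrep, if_pos hfind]
      have hno : ¬ brand <:+: norm.drop start :=
        (PySem.Chars.findFrom_natCast_eq_neg_one_iff norm brand start hs).mp hni
      have hocc : pvOcc norm brand start = [] := by
        apply pvOcc_nil
        intro i hi hiL
        by_contra hP
        rw [Bool.not_eq_false, pvP, decide_eq_true_eq] at hP
        apply hno
        have hdi : norm.drop i = (norm.drop start).drop (i - start) := by
          rw [List.drop_drop]; congr 1; omega
        rw [hdi] at hP
        exact hP.isInfix.trans (List.drop_suffix _ _).isInfix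
      simp only [pvFindLoop, hni]
      norm_num [hocc]
    · -- found at j = start + find(norm[start:]): first occurrence ≥ start
      have hge : 0 ≤ PySem.Chars.find (norm.drop start) brand := by
        have := PySem.Chars.neg_one_le_find (norm.drop start) brand
        omega
      have hni : PySem.Chars.findFrom norm brand (start : Int)
          = (start : Int) + PySem.Chars.find (norm.drop start) brand := by
        rw [hrep, if_neg hfind]
      have hnneg : ¬ (PySem.Chars.findFrom norm brand (start : Int) < 0) := by omega
      set j : Nat := (PySem.Chars.findFrom norm brand (start : Int)).toNat with hj
      have hjcast : PySem.Chars.findFrom norm brand (start : Int) = (j : Int) := by omega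
      have spec := PySem.Chars.findFrom_natCast_spec norm brand start hs (by omega)
      have hsj : start ≤ j := by omega
      have hPj : pvP norm brand j = true := by
        rw [pvP, decide_eq_true_eq]; exact spec.2.1
      have hjm : j + brand.length ≤ norm.length := pvP_le norm brand j hb (by rw [← pvP]; exact hPj)
      have hb1 : 1 ≤ brand.length := List.length_pos_iff.mpr hb
      have hjL : j < norm.length := by omega
      have hmin : ∀ i, start ≤ i → i < j → pvP norm brand i = false := by
        intro i h1 h2
        rw [pvP, decide_eq_false_iff_not]
        exact spec.2.2 i h1 h2
      have key : pvFindLoop sent norm imap brand (fuel+1) start acc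
          = pvFindLoop sent norm imap brand fuel (j+1) (acc ++ [pvF sent imap brand.length j]) := by
        simp only [pvFindLoop, hjcast]
        rw [if_neg (show ¬ ((j : Int) < 0) by omega),
            if_pos (show (j : Int) + (brand.length : Int) - 1 < (imap.length : Int) by omega)]
        simp [pvF]
      rw [key, ih (j + 1) _ (by omega) (by omega),
          pvOcc_cons norm brand start j hsj hjL hPj hmin]
      simp

lemma pvScan_eq (sent : List Char) (pairs : List (Int × Char)) (brand : List Char) (hb : brand ≠ []) :
    pvScan sent pairs brand
      = (pvOcc (pairs.map Prod.snd) brand 0).map (pvF sent (pairs.map Prod.fst) brand.length) := by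
  have hb1 : 1 ≤ brand.length := List.length_pos_iff.mpr hb
  rw [pvScan, PySem.List.foldl_append_ite, List.nil_append]
  rw [PySem.List.pyRange_one, List.filter_map, List.map_map]
  simp only [Function.comp_def, sub_zero, zero_add]
  have hnorm : ∀ k : Nat, (PySem.List.slice pairs (some ((k:Int))) (some ((k:Int) + (brand.length : Int)))).map Prod.snd
      = ((pairs.map Prod.snd).drop k).take brand.length := by
    intro k
    rw [PySem.List.slice_natCast_add, List.map_take, List.map_drop]
  have hpred : ∀ k : Nat,
      decide ((PySem.List.slice pairs (some ((k:Int))) (some ((k:Int) + (brand.length : Int)))).map Prod.snd = brand)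
        = pvP (pairs.map Prod.snd) brand k := by
    intro k
    simp only [hnorm k, pvP]
    apply decide_eq_decide.mpr
    rw [List.prefix_iff_eq_take, eq_comm]
  have hfun : ∀ k : Nat,
      (((PySem.List.pyGetD pairs ((k:Int)) (0, ' ')).1,
          String.ofList (PySem.List.slice sent
            (some (PySem.List.pyGetD pairs ((k:Int)) (0, ' ')).1)
            (some ((PySem.List.pyGetD pairs ((k:Int) + (brand.length : Int) - 1) (0, ' ')).1 + 1)))) : Int × String)
        = pvF sent (pairs.map Prod.fst) brand.length k := by
    intro k
    have h1 : (PySem.List.pyGetD pairs ((k:Int)) (0, ' ')).1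
        = PySem.List.pyGetD (pairs.map Prod.fst) (k : Int) 0 := by
      rw [← PySem.List.pyGetD_map Prod.fst pairs (k : Int) (0, ' ')]
    have h2 : (PySem.List.pyGetD pairs ((k:Int) + (brand.length : Int) - 1) (0, ' ')).1
        = PySem.List.pyGetD (pairs.map Prod.fst) ((k : Int) + (brand.length : Int) - 1) 0 := by
      rw [← PySem.List.pyGetD_map Prod.fst pairs _ (0, ' ')]
    simp only [pvF, h1, h2]
  rw [List.filter_congr (fun k _ => hpred k)]
  rw [List.map_congr_left (fun k _ => hfun k)]
  have hL : (pairs.map Prod.snd).length = pairs.length := by simp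
  rw [pvOcc, hL]
  have hzero : ∀ i : Nat, (decide (0 ≤ i) && pvP (pairs.map Prod.snd) brand i) = pvP (pairs.map Prod.snd) brand i := by
    intro i; simp
  rw [List.filter_congr (fun i _ => hzero i)]
  by_cases hm : brand.length ≤ pairs.length
  · have hn : (((pairs.length : Int)) - (brand.length : Int) + 1).toNat = pairs.length - brand.length + 1 := by omega
    rw [hn]
    have hsplit : List.range pairs.length
        = List.range (pairs.length - brand.length + 1)
          ++ (List.range (pairs.length - (pairs.length - brand.length + 1))).map (fun k => (pairs.length - brand.length + 1) + k) := by
      rw [← List.range_add]; congr 1; omega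
    have htail : List.filter (pvP (List.map Prod.snd pairs) brand)
        (List.map (fun k => pairs.length - brand.length + 1 + k)
          (List.range (pairs.length - (pairs.length - brand.length + 1)))) = [] := by
      rw [List.filter_eq_nil_iff]
      intro i hi
      simp only [List.mem_map, List.mem_range] at hi
      obtain ⟨k, hk, rfl⟩ := hi
      intro hP
      have := pvP_le (pairs.map Prod.snd) brand _ hb (by rw [← pvP]; exact hP)
      rw [hL] at this
      omega
    rw [hsplit, List.filter_append, htail, List.append_nil]
  · have hn : (((pairs.length : Int)) - (brand.length : Int) + 1).toNat = 0 := by omega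
    rw [hn]
    simp only [List.range_zero, List.filter_nil]
    rw [List.filter_eq_nil_iff.mpr, List.map_nil]
    intro i hi hP
    have := pvP_le (pairs.map Prod.snd) brand _ hb (by rw [← pvP]; exact hP)
    rw [hL] at this
    omega

-- ===== VERDICT (by name: the statement is the Claim_ definition above) =====
theorem find_normalized_mentions_py_spec : Claim_equal_find_normalized_mentions_py := by
  intro sentence normalized_brand _
  unfold Spec_find_normalized_mentions_py
  by_cases hb : normalized_brand.toList = []
  · rw [find_normalized_mentions_py, if_pos hb, find_normalized_mentions_py_alt, if_pos hb]
  · have hA : find_normalized_mentions_py sentence normalized_brand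
        = (if (pvNormWithMap sentence.toList).1 = [] then []
           else pvFindLoop sentence.toList (pvNormWithMap sentence.toList).1
                  (pvNormWithMap sentence.toList).2 normalized_brand.toList
                  ((pvNormWithMap sentence.toList).1.length + 1) 0 []) := by
      rw [find_normalized_mentions_py, if_neg hb]
    rw [hA, find_normalized_mentions_py_alt, if_neg hb, pvNormWithMap_eq,
        pvScan_eq sentence.toList _ _ hb]
    set pairs := (PySem.List.enumerate sentence.toList 0).filter (fun p => PySem.Chars.isalnum p.2) with hpairs
    by_cases hn : pairs.map Prod.snd = []
    · rw [if_pos (by simpa using hn)]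
      have : pvOcc (pairs.map Prod.snd) normalized_brand.toList 0 = [] := by
        rw [pvOcc, hn]
        simp
      rw [this, List.map_nil]
    · rw [if_neg (by simpa using hn)]
      simp only
      rw [pvFindLoop_eq sentence.toList (pairs.map Prod.snd) (pairs.map Prod.fst)
            normalized_brand.toList (by simp) hb _ 0 [] (by omega) (by omega),
          List.nil_append]
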